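-- pv_equiv track=rewrite | github.com/LumberjacksIncorperated/ThesisB | test.py | getMinYandYlength
-- ===== SOURCE A (Python) =====
-- def getMinYandYlength(matrix):
--     height = len(matrix)
--     width = len(matrix[0])
--     column_index = 0
--     firstFound = False
--     minBlack = 0
--     maxBlack = 0
--     while column_index < (height-1):
--         row_index = 0
--         while row_index < (width-1):
--             if matrix[column_index][row_index] == 0:
--                 if not firstFound:
--                     firstFound = True
--                     minBlack = column_index
--                     maxBlack = column_index
--                 else:
--                     if column_index < minBlack:
--                         minBlack = column_index
--                     if column_index > maxBlack:
--                         maxBlack = column_index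
--             row_index = row_index+1
--         column_index = column_index + 1
--     return (minBlack, maxBlack)
-- ===== SOURCE B (Python) =====
-- def getMinYandYlength(matrix):
--     height = len(matrix)
--     width = len(matrix[0])
--
--     def has_zero(r):
--         return any(matrix[r][c] == 0 for c in range(width - 1))
--
--     minBlack = next((r for r in range(height - 1) if has_zero(r)), None)
--     if minBlack is None:
--         return (0, 0)
--     maxBlack = next(r for r in range(height - 2, -1, -1) if has_zero(r))
--     return (minBlack, maxBlack)
-- ===== Notes on version B (the rewrite author's own statement) =====
-- stated objective: faster
-- what changed: Replaced the single monolithic sweep that maintains running firstFound/min/max state on every cell with a two-pass decomposition: a forward search for the first row (in rows 0..height-2) containing a zero among columns 0..width-2, then a backward search for the last such row; each row test is an early-exiting any(), removing the per-cell state updates.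
import Mathlib
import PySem

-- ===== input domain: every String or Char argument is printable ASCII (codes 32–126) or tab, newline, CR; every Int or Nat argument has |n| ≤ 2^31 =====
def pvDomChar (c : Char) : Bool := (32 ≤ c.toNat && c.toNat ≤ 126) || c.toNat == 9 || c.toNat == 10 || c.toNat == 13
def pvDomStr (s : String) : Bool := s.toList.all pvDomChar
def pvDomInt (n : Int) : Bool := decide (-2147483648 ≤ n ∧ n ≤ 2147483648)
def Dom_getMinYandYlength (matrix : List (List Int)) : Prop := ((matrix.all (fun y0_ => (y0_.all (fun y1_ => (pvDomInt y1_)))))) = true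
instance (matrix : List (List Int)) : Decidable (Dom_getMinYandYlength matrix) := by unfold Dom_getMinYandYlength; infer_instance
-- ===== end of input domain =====

-- B replaces A's single sweep with running firstFound/min/max state by a forward search for the
-- first zero-containing row and a backward search for the last one (alternative decomposition).


-- ===== PORT A =====
-- matrix[i][j] (in-bounds on every access A makes inside Pre_, so getD is exact there)
def pvCell (matrix : List (List Int)) (i j : Nat) : Int := (matrix.getD i []).getD j 0

-- the body of A's innermost `if matrix[i][j] == 0:` block (updates firstFound/minBlack/maxBlack)
def pvStepA (i : Nat) (st : Bool × Int × Int) : Bool × Int × Int :=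
  if st.1 = false then (true, (i : Int), (i : Int))
  else (st.1,
        (if (i : Int) < st.2.1 then (i : Int) else st.2.1),
        (if (i : Int) > st.2.2 then (i : Int) else st.2.2))

-- A's inner while loop over row_index
def pvInnerA (matrix : List (List Int)) (width i : Nat) (st : Bool × Int × Int) : Bool × Int × Int :=
  (List.range (width - 1)).foldl (fun st2 j => if pvCell matrix i j = 0 then pvStepA i st2 else st2) st

def getMinYandYlength (matrix : List (List Int)) : Int × Int :=
  let height := matrix.length
  let width := (matrix.headD []).length   -- len(matrix[0]); Pre_ excludes the empty matrix, where Python raises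
  let s := (List.range (height - 1)).foldl (fun st i => pvInnerA matrix width i st) (false, 0, 0)
  (s.2.1, s.2.2)

-- ===== PORT B =====
-- B's has_zero(r): any(matrix[r][c] == 0 for c in range(width - 1))
def pvRowHasZero (matrix : List (List Int)) (width r : Nat) : Bool :=
  (List.range (width - 1)).any (fun c => (matrix.getD r []).getD c 0 == 0)

def getMinYandYlength_alt (matrix : List (List Int)) : Int × Int :=
  let height := matrix.length
  let width := (matrix.headD []).length
  match (List.range (height - 1)).find? (pvRowHasZero matrix width) with
  | none => (0, 0)
  | some mn =>
      -- backward search: next(r for r in range(height-2, -1, -1) if has_zero(r)); it always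
      -- finds one (mn qualifies), so the getD default is never used.
      let mx := (((List.range (height - 1)).reverse.find? (pvRowHasZero matrix width)).getD mn)
      ((mn : Int), (mx : Int))

-- ===== PRECONDITION & SPEC =====
-- Pre_ excludes exactly the inputs where Python A raises an IndexError: the empty matrix
-- (len(matrix[0])), and matrices where some scanned row 0..height-2 is shorter than width-1.
def Pre_getMinYandYlength (matrix : List (List Int)) : Prop :=
  matrix ≠ [] ∧ ∀ i ∈ List.range (matrix.length - 1),
    (matrix.headD []).length - 1 ≤ (matrix.getD i []).length
instance (matrix : List (List Int)) : Decidable (Pre_getMinYandYlength matrix) := by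
  unfold Pre_getMinYandYlength; infer_instance

def pvWitness_getMinYandYlength : List (List Int) := [[1, 0], [1, 1]]

def Spec_getMinYandYlength (matrix : List (List Int)) (out : Int × Int) : Prop := out = getMinYandYlength_alt matrix
instance (matrix : List (List Int)) (out : Int × Int) : Decidable (Spec_getMinYandYlength matrix out) := by unfold Spec_getMinYandYlength; infer_instance

-- ===== CLAIM (what is proved, stated in full; the proofs are below) =====
def Claim_equal_getMinYandYlength : Prop := ∀ (matrix : List (List Int)), Dom_getMinYandYlength matrix → Pre_getMinYandYlength matrix → Spec_getMinYandYlength matrix (getMinYandYlength matrix)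

-- ===== LEMMAS AND PROOFS =====

-- a fold that conditionally applies an idempotent step equals one conditional application
theorem pv_foldl_if_any {α β : Type} (p : β → Bool) (f : α → α)
    (hf : ∀ s, f (f s) = f s) :
    ∀ (l : List β) (st : α),
      l.foldl (fun s b => if p b then f s else s) st = if l.any p then f st else st := by
  intro l
  induction l with
  | nil => intro st; simp
  | cons b l ih =>
    intro st
    simp only [List.foldl_cons, List.any_cons]
    by_cases h : p b = true
    · rw [if_pos h, ih]
      simp [h, hf]
    · simp only [Bool.not_eq_true] at h
      rw [if_neg (by simp [h]), ih]
      simp [h]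

theorem pvStepA_idem (i : Nat) (st : Bool × Int × Int) : pvStepA i (pvStepA i st) = pvStepA i st := by
  obtain ⟨b, m, M⟩ := st
  cases b
  · simp [pvStepA]
  · simp [pvStepA]
    constructor <;> (split_ifs <;> omega)

theorem pvInnerA_eq (matrix : List (List Int)) (width i : Nat) (st : Bool × Int × Int) :
    pvInnerA matrix width i st = if pvRowHasZero matrix width i then pvStepA i st else st := by
  unfold pvInnerA pvRowHasZero
  have hbody : (fun (st2 : Bool × Int × Int) (j : Nat) =>
      if pvCell matrix i j = 0 then pvStepA i st2 else st2) =
      (fun st2 j => if ((matrix.getD i []).getD j 0 == 0) then pvStepA i st2 else st2) := by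
    funext st2 j
    simp [pvCell, beq_iff_eq]
  rw [hbody, pv_foldl_if_any (fun j => (matrix.getD i []).getD j 0 == 0) (pvStepA i)
        (pvStepA_idem i) (List.range (width - 1)) st]

theorem pv_main (matrix : List (List Int)) (width : Nat) : ∀ (n : Nat),
    (List.range n).foldl (fun st i => pvInnerA matrix width i st) (false, 0, 0) =
      match (List.range n).find? (pvRowHasZero matrix width) with
      | none => (false, (0 : Int), (0 : Int))
      | some mn =>
          (true, (mn : Int),
            ((((List.range n).reverse.find? (pvRowHasZero matrix width)).getD mn : Nat) : Int)) := by
  intro n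
  induction n with
  | zero => simp
  | succ n ih =>
    rw [List.range_succ, List.foldl_append, List.foldl_cons, List.foldl_nil, ih, pvInnerA_eq,
        List.find?_append, List.reverse_append]
    simp only [List.reverse_cons, List.reverse_nil, List.nil_append, List.singleton_append,
      List.find?_cons]
    cases hfind : (List.range n).find? (pvRowHasZero matrix width) with
    | none =>
      cases hz : pvRowHasZero matrix width n with
      | false =>
        simp
      | true =>
        simp [pvStepA]
    | some mn =>
      have hmn : mn < n := List.mem_range.mp (List.mem_of_find?_eq_some hfind)
      have hrev : ∃ mx, (List.range n).reverse.find? (pvRowHasZero matrix width) = some mx := by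
        have hex : ∃ x ∈ (List.range n).reverse, pvRowHasZero matrix width x := by
          exact ⟨mn, List.mem_reverse.mpr (List.mem_of_find?_eq_some hfind),
                 List.find?_eq_some_iff_append.mp hfind |>.1⟩
        obtain ⟨mx, hmem, hp⟩ := hex
        rcases h : (List.range n).reverse.find? (pvRowHasZero matrix width) with _ | mx'
        · exact absurd hp (by simpa using List.find?_eq_none.mp h mx hmem)
        · exact ⟨mx', rfl⟩
      obtain ⟨mx, hmx⟩ := hrev
      have hmxlt : mx < n :=
        List.mem_range.mp (List.mem_reverse.mp (List.mem_of_find?_eq_some hmx))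
      cases hz : pvRowHasZero matrix width n with
      | false =>
        simp [hmx]
      | true =>
        simp only [hmx, Option.getD_some, if_true]
        simp only [pvStepA]
        have h1 : ¬ ((n : Int) < (mn : Int)) := by exact_mod_cast Nat.not_lt.mpr (Nat.le_of_lt hmn)
        have h2 : (n : Int) > (mx : Int) := by exact_mod_cast hmxlt
        simp [h1, h2]

-- ===== VERDICT (by name: the statement is the Claim_ definition above) =====
theorem getMinYandYlength_spec : Claim_equal_getMinYandYlength := by
  intro matrix _ _
  unfold Spec_getMinYandYlength getMinYandYlength getMinYandYlength_alt
  simp only [pv_main]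
  cases hfind : (List.range (matrix.length - 1)).find? (pvRowHasZero matrix (matrix.headD []).length) with
  | none => simp
  | some mn => simp
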